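-- pv_equiv track=rewrite | github.com/mostgood1/WNBA-Betting | tools/audit_prop_player_aliases.py | _name_tokens
-- ===== SOURCE A (Python) =====
-- import unicodedata
-- from typing import Any
--
-- _SUFFIX_TOKENS = frozenset({"JR", "SR", "II", "III", "IV", "V"})
--
-- def _name_tokens(value: Any) -> list[str]:
--     text = str(value or "").strip()
--     if not text:
--         return []
--     if "(" in text:
--         text = text.split("(", 1)[0]
--     text = text.replace("-", " ")
--     text = text.replace(".", "").replace("'", "").replace(",", " ")
--     text = " ".join(text.split())
--     if not text:
--         return []
--     try:
--         text = unicodedata.normalize("NFKD", text)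
--         text = "".join(ch for ch in text if not unicodedata.combining(ch))
--         text = text.encode("ascii", "ignore").decode("ascii")
--     except Exception:
--         pass
--     return [token for token in text.upper().split() if token and token not in _SUFFIX_TOKENS]
-- ===== SOURCE B (Python) =====
-- import unicodedata
-- from typing import Any
--
-- _SUFFIX_TOKENS = frozenset({"JR", "SR", "II", "III", "IV", "V"})
--
-- def _name_tokens(value: Any) -> list[str]:
--     text = str(value or "").partition("(")[0]
--     text = unicodedata.normalize("NFKD", text)
--     text = "".join(ch for ch in text if not unicodedata.combining(ch))
--     text = text.encode("ascii", "ignore").decode("ascii")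
--     tokens = []
--     cur = []
--     for ch in text:
--         if ch in " \t\n\r\x0b\x0c-,":
--             if cur:
--                 tokens.append("".join(cur))
--                 cur = []
--         elif ch in ".'":
--             pass
--         else:
--             cur.append(ch)
--     if cur:
--         tokens.append("".join(cur))
--     out = []
--     for tok in tokens:
--         up = tok.upper()
--         if up not in _SUFFIX_TOKENS:
--             out.append(up)
--     return out
-- ===== Notes on version B (the rewrite author's own statement) =====
-- stated objective: simpler
-- what changed: Replaced A's multi-pass pipeline (strip, split on '(', four single-character replaces, split/join whitespace normalisation, upper-then-split) with one character-by-character scan that cuts at the first '(' and builds the tokens directly, uppercasing and suffix-filtering each finished token.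
import Mathlib
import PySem

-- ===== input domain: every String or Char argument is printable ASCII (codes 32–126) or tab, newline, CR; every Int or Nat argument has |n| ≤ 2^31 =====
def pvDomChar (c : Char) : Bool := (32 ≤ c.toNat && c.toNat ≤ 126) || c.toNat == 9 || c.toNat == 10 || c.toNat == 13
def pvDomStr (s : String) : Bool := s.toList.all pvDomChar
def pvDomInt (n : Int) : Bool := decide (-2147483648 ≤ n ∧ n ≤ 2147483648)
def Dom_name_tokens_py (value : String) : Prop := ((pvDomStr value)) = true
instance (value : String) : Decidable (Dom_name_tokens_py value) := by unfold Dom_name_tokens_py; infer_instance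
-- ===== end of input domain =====

-- B replaces A's multi-pass replace/split/join pipeline with a single character scan that cuts at the
-- first '(' and builds tokens directly (objective: simpler, one traversal instead of several passes).

def pvSuffixTokens : List String := ["JR", "SR", "II", "III", "IV", "V"]

-- ===== PORT A =====
def name_tokens_py (value : String) : List String :=
  -- text = str(value or "").strip()  (value is a str; 'value or ""' is the identity on it)
  let text := PySem.Str.strip value
  if text = "" then []
  else
    -- if "(" in text: text = text.split("(", 1)[0]
    let text1 := if PySem.Str.isIn "(" text then ((PySem.Str.splitMax? text "(" 1).getD []).headD "" else text
    let text2 := PySem.Str.replace text1 "-" " "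
    let text3 := PySem.Str.replace (PySem.Str.replace (PySem.Str.replace text2 "." "") "'" "") "," " "
    let text4 := PySem.Str.join " " (PySem.Str.split₀ text3)
    if text4 = "" then []
    else
      -- unicodedata NFKD / combining-mark drop / ascii encode-ignore: identity on this ASCII domain, ported as identity
      (PySem.Str.split₀ (PySem.Str.upper text4)).filter
        (fun tok => tok != "" && !(pvSuffixTokens.contains tok))

-- ===== PORT B =====
def pvSepChars : List Char := [' ', '\t', '\n', '\r', '\x0B', '\x0C', '-', ',']

-- the character scan of Source B: cur is the current token (reversed), toks the finished tokens (reversed)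
def pvBGo : List Char → List Char → List (List Char) → List (List Char)
  | [], cur, toks => (if cur.isEmpty then toks else cur.reverse :: toks).reverse
  | c :: rest, cur, toks =>
    if c ∈ pvSepChars then
      if cur.isEmpty then pvBGo rest [] toks else pvBGo rest [] (cur.reverse :: toks)
    else if c = '.' || c = '\'' then pvBGo rest cur toks
    else pvBGo rest (c :: cur) toks

def name_tokens_py_alt (value : String) : List String :=
  -- text = str(value or "").partition("(")[0]; the NFKD/combining/ascii steps are identity on this ASCII domain
  let cs := value.toList.takeWhile (· ≠ '(')
  let toks := pvBGo cs [] []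
  (toks.map (fun t => String.ofList (PySem.Chars.upper t))).filter
    (fun tok => !(pvSuffixTokens.contains tok))

-- ===== PRECONDITION & SPEC =====
def Spec_name_tokens_py (value : String) (out : List String) : Prop := out = name_tokens_py_alt value
instance (value : String) (out : List String) : Decidable (Spec_name_tokens_py value out) := by unfold Spec_name_tokens_py; infer_instance

-- ===== CLAIM (what is proved, stated in full; the proofs are below) =====
def Claim_equal_name_tokens_py : Prop := ∀ (value : String), Dom_name_tokens_py value → Spec_name_tokens_py value (name_tokens_py value)

-- ===== LEMMAS AND PROOFS =====

-- canonical forward splitter: pvW l cur = whitespace-split of cur.reverse ++ l (cur reversed, space-free)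
def pvW : List Char → List Char → List (List Char)
  | [], cur => if cur.isEmpty then [] else [cur.reverse]
  | c :: rest, cur =>
    if PySem.Chars.isspace c then
      if cur.isEmpty then pvW rest [] else cur.reverse :: pvW rest []
    else pvW rest (c :: cur)

-- the character substitution A's replace pipeline performs
def pvF (c : Char) : List Char :=
  if c = '-' then [' ']
  else if c = '.' then []
  else if c = '\'' then []
  else if c = ',' then [' ']
  else [c]

lemma pv_char_eq_iff_toNat (a b : Char) : a = b ↔ a.toNat = b.toNat :=
  ⟨fun h => h ▸ rfl, fun h => Char.ext (UInt32.toNat_inj.mp h)⟩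

lemma pv_split₀_go_eq (l : List Char) : ∀ cur acc,
    PySem.Chars.split₀.go l cur acc = acc.reverse ++ pvW l cur := by
  induction l with
  | nil =>
    intro cur acc
    rw [PySem.Chars.split₀.go, pvW]
    by_cases h : cur.isEmpty <;> simp [h]
  | cons c rest ih =>
    intro cur acc
    rw [PySem.Chars.split₀.go, pvW]
    by_cases hs : PySem.Chars.isspace c
    · by_cases h : cur.isEmpty <;> simp [hs, h, ih]
    · simp [hs, ih]

lemma pv_split₀_eq_pvW (l : List Char) : PySem.Chars.split₀ l = pvW l [] := by
  rw [PySem.Chars.split₀, pv_split₀_go_eq]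
  rfl

lemma pv_replace_go_single (a : Char) (new : List Char) :
    ∀ (l : List Char) (fuel : Nat) (acc : List Char), l.length ≤ fuel →
      PySem.Chars.replace.go [a] new fuel l acc
        = acc.reverse ++ l.flatMap (fun c => if c = a then new else [c]) := by
  intro l
  induction l with
  | nil =>
    intro fuel acc _
    cases fuel <;> · rw [PySem.Chars.replace.go]; simp; try omega
  | cons c t ih =>
    intro fuel acc hle
    cases fuel with
    | zero => simp at hle
    | succ f =>
      rw [PySem.Chars.replace.go]
      by_cases hc : c = a
      · subst hc
        have hpre : [c].isPrefixOf (c :: t) = true := by simp [List.isPrefixOf]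
        simp only [hpre, if_pos]
        have hd : List.drop [c].length (c :: t) = t := rfl
        rw [hd, ih f (new.reverse ++ acc) (by simpa using hle)]
        simp
      · have hpre : [a].isPrefixOf (c :: t) = false := by
          simp [List.isPrefixOf]
          exact fun h => (hc h.symm).elim
        simp only [hpre, Bool.false_eq_true, if_false]
        rw [ih f (c :: acc) (by simpa using hle)]
        simp [hc]

lemma pv_replace_single (s : List Char) (a : Char) (new : List Char) :
    PySem.Chars.replace s [a] new = s.flatMap (fun c => if c = a then new else [c]) := by
  rw [PySem.Chars.replace]
  simp only [List.isEmpty_cons, Bool.false_eq_true, if_false]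
  rw [pv_replace_go_single a new s s.length [] le_rfl]
  rfl

-- A's four single-character replaces compose to flatMap pvF
lemma pv_pipeline_eq_flatMap (l : List Char) :
    PySem.Chars.replace (PySem.Chars.replace (PySem.Chars.replace
      (PySem.Chars.replace l ['-'] [' ']) ['.'] []) ['\''] []) [','] [' ']
      = l.flatMap pvF := by
  rw [pv_replace_single, pv_replace_single, pv_replace_single, pv_replace_single]
  rw [List.flatMap_assoc, List.flatMap_assoc, List.flatMap_assoc]
  induction l with
  | nil => rfl
  | cons c t ih =>
    rw [List.flatMap_cons, List.flatMap_cons, ih]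
    congr 1
    by_cases h1 : c = '-'
    · subst h1; rfl
    · by_cases h2 : c = '.'
      · subst h2; rfl
      · by_cases h3 : c = '\''
        · subst h3; rfl
        · by_cases h4 : c = ','
          · subst h4; rfl
          · simp [pvF, h1, h2, h3, h4]

-- domain characters that are not one of B's explicit separators are not Python whitespace
lemma pv_isspace_dom (c : Char) (h : pvDomChar c = true) :
    PySem.Chars.isspace c = true ↔ (c = ' ' ∨ c = '\t' ∨ c = '\n' ∨ c = '\r') := by
  have hn : (32 ≤ c.toNat ∧ c.toNat ≤ 126) ∨ c.toNat = 9 ∨ c.toNat = 10 ∨ c.toNat = 13 := by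
    simp only [pvDomChar, Bool.or_eq_true, Bool.and_eq_true, decide_eq_true_eq,
      beq_iff_eq] at h
    omega
  simp only [PySem.Chars.isspace,
    Bool.or_eq_true, Bool.and_eq_true, decide_eq_true_eq, pv_char_eq_iff_toNat]
  have e1 : (' ' : Char).toNat = 32 := rfl
  have e2 : ('\t' : Char).toNat = 9 := rfl
  have e3 : ('\n' : Char).toNat = 10 := rfl
  have e4 : ('\r' : Char).toNat = 13 := rfl
  rw [e1, e2, e3, e4]
  omega

-- B's scanner computes the whitespace-split of A's substituted text
lemma pv_bGo_eq (l : List Char) (h : ∀ c ∈ l, pvDomChar c = true) :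
    ∀ cur toks, pvBGo l cur toks = toks.reverse ++ pvW (l.flatMap pvF) cur := by
  induction l with
  | nil =>
    intro cur toks
    rw [pvBGo]
    by_cases hc : cur.isEmpty <;> simp [hc, pvW]
  | cons c rest ih =>
    have hdc : pvDomChar c = true := h c List.mem_cons_self
    have hrest : ∀ x ∈ rest, pvDomChar x = true := fun x hx => h x (List.mem_cons_of_mem c hx)
    have ih' := ih hrest
    intro cur toks
    rw [pvBGo]
    by_cases hsep : c ∈ pvSepChars
    · have hstep : ∃ d, pvF c = [d] ∧ PySem.Chars.isspace d = true := by
        simp only [pvSepChars, List.mem_cons, List.not_mem_nil, or_false] at hsep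
        rcases hsep with rfl | rfl | rfl | rfl | rfl | rfl | rfl | rfl <;>
          exact ⟨_, rfl, by decide⟩
      obtain ⟨d, hd, hds⟩ := hstep
      simp only [hsep, if_pos, List.flatMap_cons, hd, List.cons_append]
      rw [pvW]
      by_cases hc : cur.isEmpty <;> simp [hc, hds, ih']
    · have hne : c ≠ ' ' ∧ c ≠ '\t' ∧ c ≠ '\n' ∧ c ≠ '\r' ∧ c ≠ '\x0B' ∧ c ≠ '\x0C' ∧ c ≠ '-' ∧ c ≠ ',' := by
        simp only [pvSepChars, List.mem_cons, List.not_mem_nil, or_false] at hsep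
        tauto
      simp only [hsep, if_neg, Bool.false_eq_true, if_false]
      by_cases hskip : c = '.' ∨ c = '\''
      · have hF : pvF c = [] := by
          rcases hskip with rfl | rfl <;> rfl
        have hb : (c = '.' || c = '\'') = true := by
          rcases hskip with rfl | rfl <;> simp
        simp [hb, List.flatMap_cons, hF, ih']
      · push_neg at hskip
        have hb : (c = '.' || c = '\'') = false := by
          simp [hskip.1, hskip.2]
        have hF : pvF c = [c] := by
          simp [pvF, hne.2.2.2.2.2.2.1, hskip.1, hskip.2, hne.2.2.2.2.2.2.2]
        have hss : PySem.Chars.isspace c = false := by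
          apply Bool.eq_false_iff.mpr
          intro hT
          rcases (pv_isspace_dom c hdc).mp hT with rfl | rfl | rfl | rfl
          · exact hne.1 rfl
          · exact hne.2.1 rfl
          · exact hne.2.2.1 rfl
          · exact hne.2.2.2.1 rfl
        simp only [hb, Bool.false_eq_true, if_false, List.flatMap_cons, hF, List.cons_append,
          List.nil_append]
        rw [pvW]
        simp [hss, ih']

lemma pv_pvW_allspace (l : List Char) (h : ∀ c ∈ l, PySem.Chars.isspace c = true) :
    ∀ cur, pvW l cur = if cur.isEmpty then [] else [cur.reverse] := by
  induction l with
  | nil => intro cur; rw [pvW]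
  | cons c rest ih =>
    intro cur
    have hc : PySem.Chars.isspace c = true := h c List.mem_cons_self
    have hrest : ∀ x ∈ rest, PySem.Chars.isspace x = true := fun x hx => h x (List.mem_cons_of_mem c hx)
    rw [pvW]
    by_cases hcur : cur.isEmpty <;> simp [hc, hcur, ih hrest]

lemma pv_pvW_ws_prefix (p : List Char) (h : ∀ c ∈ p, PySem.Chars.isspace c = true) (y : List Char) :
    pvW (p ++ y) [] = pvW y [] := by
  induction p with
  | nil => rfl
  | cons c t ih =>
    have hc : PySem.Chars.isspace c = true := h c List.mem_cons_self
    have ht : ∀ x ∈ t, PySem.Chars.isspace x = true := fun x hx => h x (List.mem_cons_of_mem c hx)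
    rw [List.cons_append, pvW]
    simp [hc, ih ht]

lemma pv_pvW_ws_suffix (w : List Char) (h : ∀ c ∈ w, PySem.Chars.isspace c = true) (y : List Char) :
    ∀ cur, pvW (y ++ w) cur = pvW y cur := by
  induction y with
  | nil =>
    intro cur
    simp only [List.nil_append]
    rw [pv_pvW_allspace w h cur, pvW]
  | cons c t ih =>
    intro cur
    rw [List.cons_append, pvW]
    conv_rhs => rw [pvW]
    by_cases hs : PySem.Chars.isspace c
    · by_cases hc : cur.isEmpty <;> simp [hs, hc, ih]
    · simp [hs, ih]

lemma pv_pvW_word (w : List Char) (h : ∀ c ∈ w, PySem.Chars.isspace c = false) (l : List Char) :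
    ∀ cur, pvW (w ++ l) cur = pvW l (w.reverse ++ cur) := by
  induction w with
  | nil => intro cur; rfl
  | cons c t ih =>
    intro cur
    have hc : PySem.Chars.isspace c = false := h c List.mem_cons_self
    have ht : ∀ x ∈ t, PySem.Chars.isspace x = false := fun x hx => h x (List.mem_cons_of_mem c hx)
    rw [List.cons_append, pvW]
    simp only [hc, Bool.false_eq_true, if_false]
    rw [ih ht (c :: cur)]
    simp

-- every word produced by pvW is nonempty and space-free
lemma pv_pvW_words (l : List Char) : ∀ cur, (∀ c ∈ cur, PySem.Chars.isspace c = false) →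
    ∀ w ∈ pvW l cur, w ≠ [] ∧ ∀ c ∈ w, PySem.Chars.isspace c = false := by
  induction l with
  | nil =>
    intro cur hcur w hw
    rw [pvW] at hw
    by_cases hc : cur.isEmpty
    · simp [hc] at hw
    · simp only [hc, Bool.false_eq_true, if_false, List.mem_cons, List.not_mem_nil, or_false] at hw
      subst hw
      constructor
      · intro hx
        exact hc (by simp [List.reverse_eq_nil_iff.mp hx])
      · intro c hc'
        exact hcur c (List.mem_reverse.mp hc')
  | cons c rest ih =>
    intro cur hcur w hw
    rw [pvW] at hw
    by_cases hs : PySem.Chars.isspace c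
    · by_cases hc : cur.isEmpty
      · simp only [hs, if_pos, hc] at hw
        exact ih [] (fun x hx => by simp at hx) w hw
      · simp only [hs, if_pos, hc, Bool.false_eq_true, if_false, List.mem_cons] at hw
        rcases hw with rfl | hw
        · constructor
          · intro hx
            exact hc (by simp [List.reverse_eq_nil_iff.mp hx])
          · intro x hx; exact hcur x (List.mem_reverse.mp hx)
        · exact ih [] (fun x hx => by simp at hx) w hw
    · simp only [hs, Bool.false_eq_true, if_false] at hw
      refine ih (c :: cur) ?_ w hw
      intro x hx
      rcases List.mem_cons.mp hx with rfl | hx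
      · simpa using hs
      · exact hcur x hx

-- splitting the space-join of the words gives the words back
lemma pv_join_split (ws : List (List Char))
    (h : ∀ w ∈ ws, w ≠ [] ∧ ∀ c ∈ w, PySem.Chars.isspace c = false) :
    pvW (List.intercalate [' '] ws) [] = ws := by
  induction ws with
  | nil => rfl
  | cons w ws ih =>
    have hw := h w List.mem_cons_self
    cases ws with
    | nil =>
      have h1 : List.intercalate [' '] [w] = w := by simp [List.intercalate, List.intersperse]
      rw [h1]
      conv_lhs => rw [← List.append_nil w]
      rw [pv_pvW_word w hw.2 [] [], pvW]
      simp [hw.1]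
    | cons v ws' =>
      have h2 : List.intercalate [' '] (w :: v :: ws')
          = w ++ ' ' :: List.intercalate [' '] (v :: ws') := by
        simp [List.intercalate, List.intersperse]
      rw [h2, pv_pvW_word w hw.2 _ [], pvW]
      have hsp : PySem.Chars.isspace ' ' = true := by decide
      have hne : (w.reverse ++ []).isEmpty = false := by simp [hw.1]
      simp only [hsp, if_pos, hne, Bool.false_eq_true, if_false]
      rw [ih (fun x hx => h x (List.mem_cons_of_mem w hx))]
      simp

lemma pv_isspace_nonspace_range (d : Char) (h1 : 65 ≤ d.toNat) (h2 : d.toNat ≤ 122) :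
    PySem.Chars.isspace d = false := by
  apply Bool.eq_false_iff.mpr
  intro hT
  simp only [PySem.Chars.isspace, Bool.or_eq_true, Bool.and_eq_true, decide_eq_true_eq] at hT
  omega

lemma pv_isspace_upperChar (c : Char) :
    PySem.Chars.isspace (PySem.Chars.upperChar c) = PySem.Chars.isspace c := by
  rw [PySem.Chars.upperChar]
  by_cases hl : PySem.Chars.islower c
  · have hn : 97 ≤ c.toNat ∧ c.toNat ≤ 122 := by
      simp only [PySem.Chars.islower, Bool.and_eq_true, decide_eq_true_eq] at hl
      obtain ⟨h1, h2⟩ := hl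
      exact ⟨h1, h2⟩
    have hv : Nat.isValidChar (c.toNat - 32) := Or.inl (by omega)
    have ht : (Char.ofNat (c.toNat - 32)).toNat = c.toNat - 32 := by
      unfold Char.ofNat
      rw [dif_pos hv]
      simp only [Char.ofNatAux]
      show (UInt32.ofNatLT (c.toNat - 32) _).toNat = c.toNat - 32
      exact UInt32.toNat_ofNatLT
    simp only [hl, if_pos]
    rw [pv_isspace_nonspace_range _ (by omega) (by omega),
      pv_isspace_nonspace_range c (by omega) (by omega)]
  · simp [hl]

lemma pv_pvW_upper (l : List Char) : ∀ cur,
    pvW (l.map PySem.Chars.upperChar) (cur.map PySem.Chars.upperChar)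
      = (pvW l cur).map (List.map PySem.Chars.upperChar) := by
  induction l with
  | nil =>
    intro cur
    rw [List.map_nil, pvW]
    conv_rhs => rw [pvW]
    by_cases hc : cur.isEmpty
    · simp [hc, List.isEmpty_iff.mp hc]
    · have : cur ≠ [] := by simpa [List.isEmpty_iff] using hc
      simp [hc, this, List.map_reverse]
  | cons c rest ih =>
    intro cur
    rw [List.map_cons, pvW]
    conv_rhs => rw [pvW]
    rw [pv_isspace_upperChar]
    by_cases hs : PySem.Chars.isspace c
    · by_cases hc : cur.isEmpty
      · have hmap : (cur.map PySem.Chars.upperChar).isEmpty = true := by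
          simp [List.isEmpty_iff.mp hc]
        simpa [hs, hc, hmap] using ih []
      · have : cur ≠ [] := by simpa [List.isEmpty_iff] using hc
        have hmap : (cur.map PySem.Chars.upperChar).isEmpty = false := by
          simp [List.isEmpty_iff, this]
        have h0 := ih []
        rw [List.map_nil] at h0
        simp only [hs, if_pos, hc, hmap, Bool.false_eq_true, if_false, List.map_cons, h0,
          List.map_reverse]
    · simp only [hs, Bool.false_eq_true, if_false]
      simpa using ih (c :: cur)

-- pvF is the identity on domain whitespace characters
lemma pv_pvF_ws (c : Char) (hd : pvDomChar c = true) (hs : PySem.Chars.isspace c = true) :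
    pvF c = [c] := by
  rcases (pv_isspace_dom c hd).mp hs with rfl | rfl | rfl | rfl <;> rfl

lemma pv_flatMap_pvF_ws (l : List Char)
    (h : ∀ c ∈ l, pvDomChar c = true ∧ PySem.Chars.isspace c = true) :
    l.flatMap pvF = l := by
  induction l with
  | nil => rfl
  | cons c t ih =>
    rw [List.flatMap_cons, pv_pvF_ws c (h c List.mem_cons_self).1 (h c List.mem_cons_self).2,
      ih (fun x hx => h x (List.mem_cons_of_mem c hx))]
    rfl

lemma pv_splitOnMax_go_zero : ∀ (fuel : Nat) (l cur : List Char) (acc : List (List Char)),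
    PySem.Chars.splitOnMax.go ['('] fuel 0 l cur acc = acc.reverse ++ [cur.reverse ++ l] := by
  intro fuel l cur acc
  cases fuel with
  | zero => rw [PySem.Chars.splitOnMax.go]; simp
  | succ f =>
    cases l with
    | nil => rw [PySem.Chars.splitOnMax.go]; simp; try omega
    | cons c t => rw [PySem.Chars.splitOnMax.go]; simp

-- first piece of text.split("(", 1) is the prefix before the first '('
lemma pv_splitOnMax_go_head (l : List Char) : ∀ (fuel : Nat) (cur : List Char) (acc : List (List Char)),
    l.length < fuel →
    ∃ tail, PySem.Chars.splitOnMax.go ['('] fuel 1 l cur acc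
      = acc.reverse ++ (cur.reverse ++ l.takeWhile (· ≠ '(')) :: tail := by
  induction l with
  | nil =>
    intro fuel cur acc hlt
    cases fuel with
    | zero => omega
    | succ f =>
      rw [PySem.Chars.splitOnMax.go]
      refine ⟨[], ?_⟩
      simp
      try omega
  | cons c t ih =>
    intro fuel cur acc hlt
    cases fuel with
    | zero => omega
    | succ f =>
      rw [PySem.Chars.splitOnMax.go]
      by_cases hc : c = '('
      · subst hc
        have hpre : ['('].isPrefixOf ('(' :: t) = true := by simp [List.isPrefixOf]
        simp only [hpre, if_pos, Nat.one_ne_zero, if_false]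
        rw [pv_splitOnMax_go_zero]
        refine ⟨[t], ?_⟩
        have htw : ('(' :: t).takeWhile (· ≠ '(') = [] := by
          simp [List.takeWhile_cons]
        rw [htw]
        simp
      · have hpre : ['('].isPrefixOf (c :: t) = false := by
          simp [List.isPrefixOf]
          exact fun h => (hc h.symm).elim
        simp only [hpre, Bool.false_eq_true, if_false, Nat.one_ne_zero]
        obtain ⟨tail, htail⟩ := ih f (c :: cur) acc (by simpa using hlt)
        refine ⟨tail, ?_⟩
        have hd : List.drop ['('].length (c :: t) = t := rfl
        rw [htail]
        have htw : (c :: t).takeWhile (· ≠ '(') = c :: t.takeWhile (· ≠ '(') := by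
          rw [List.takeWhile_cons_of_pos (by simp [hc])]
        rw [htw]
        simp

lemma pv_splitOnMax_head (l : List Char) :
    ∃ tail, PySem.Chars.splitOnMax l ['('] 1 = (l.takeWhile (· ≠ '(')) :: tail := by
  rw [PySem.Chars.splitOnMax]
  simp only [show ¬((1 : Int) < 0) by norm_num, if_false]
  obtain ⟨tail, htail⟩ := pv_splitOnMax_go_head l (l.length + 1) [] [] (by omega)
  exact ⟨tail, by simpa using htail⟩

-- takeWhile stops inside the first block when some element there fails the predicate
lemma pv_takeWhile_append_stop (p : Char → Bool) (l₁ l₂ : List Char) (c : Char)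
    (hc : c ∈ l₁) (hpc : p c = false) :
    (l₁ ++ l₂).takeWhile p = l₁.takeWhile p := by
  induction l₁ with
  | nil => simp at hc
  | cons a t ih =>
    by_cases hpa : p a
    · rw [List.cons_append, List.takeWhile_cons_of_pos hpa, List.takeWhile_cons_of_pos hpa]
      rcases List.mem_cons.mp hc with rfl | hm
      · rw [hpa] at hpc; cases hpc
      · rw [ih hm]
    · have hpa' : p a = false := by simpa using hpa
      rw [List.cons_append, List.takeWhile_cons_of_neg (by simp [hpa']),
        List.takeWhile_cons_of_neg (by simp [hpa'])]

lemma pv_isspace_ne_paren (c : Char) (hs : PySem.Chars.isspace c = true) :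
    (decide (c ≠ '(')) = true := by
  simp only [decide_eq_true_eq]
  intro heq
  subst heq
  exact absurd hs (by decide)

-- stripping commutes with token extraction
lemma pv_strip_tokens (cs : List Char) (h : ∀ c ∈ cs, pvDomChar c = true) :
    pvW (((PySem.Chars.strip cs).takeWhile (· ≠ '(')).flatMap pvF) []
      = pvW ((cs.takeWhile (· ≠ '(')).flatMap pvF) [] := by
  have hlsplit : cs = cs.takeWhile PySem.Chars.isspace ++ cs.dropWhile PySem.Chars.isspace :=
    List.takeWhile_append_dropWhile.symm
  have htw_ws : ∀ c ∈ cs.takeWhile PySem.Chars.isspace, PySem.Chars.isspace c = true :=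
    fun c hc => List.mem_takeWhile_imp hc
  have htw_dom : ∀ c ∈ cs.takeWhile PySem.Chars.isspace, pvDomChar c = true :=
    fun c hc => h c ((List.takeWhile_sublist _).mem hc)
  have hm_dom : ∀ c ∈ cs.dropWhile PySem.Chars.isspace, pvDomChar c = true :=
    fun c hc => h c ((List.dropWhile_sublist _).mem hc)
  have hstrip : PySem.Chars.strip cs
      = PySem.Chars.rstrip (cs.dropWhile PySem.Chars.isspace) := by
    rw [PySem.Chars.strip, PySem.Chars.lstrip]
  -- reduce the right-hand side to the tokens of the left-stripped list
  have hR : cs.takeWhile (· ≠ '(')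
      = cs.takeWhile PySem.Chars.isspace ++ (cs.dropWhile PySem.Chars.isspace).takeWhile (· ≠ '(') := by
    conv_lhs => rw [hlsplit]
    exact List.takeWhile_append_of_pos (fun c hc => pv_isspace_ne_paren c (htw_ws c hc))
  rw [hR, List.flatMap_append,
    pv_flatMap_pvF_ws _ (fun c hc => ⟨htw_dom c hc, htw_ws c hc⟩),
    pv_pvW_ws_prefix _ htw_ws, hstrip]
  -- now work on the right-stripped list m = r ++ q with q trailing whitespace
  generalize hmm : cs.dropWhile PySem.Chars.isspace = m at *
  have hmrq : m = PySem.Chars.rstrip m ++ (m.reverse.takeWhile PySem.Chars.isspace).reverse := by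
    rw [PySem.Chars.rstrip]
    conv_lhs => rw [← List.reverse_reverse m,
      ← List.takeWhile_append_dropWhile (p := PySem.Chars.isspace) (l := m.reverse)]
    rw [List.reverse_append]
  have hq_ws : ∀ c ∈ (m.reverse.takeWhile PySem.Chars.isspace).reverse,
      PySem.Chars.isspace c = true :=
    fun c hc => List.mem_takeWhile_imp (List.mem_reverse.mp hc)
  have hq_dom : ∀ c ∈ (m.reverse.takeWhile PySem.Chars.isspace).reverse, pvDomChar c = true :=
    fun c hc =>
      hm_dom c (List.mem_reverse.mp ((List.takeWhile_sublist _).mem (List.mem_reverse.mp hc)))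
  by_cases hpar : '(' ∈ PySem.Chars.rstrip m
  · have hstop : m.takeWhile (· ≠ '(') = (PySem.Chars.rstrip m).takeWhile (· ≠ '(') := by
      conv_lhs => rw [hmrq]
      exact pv_takeWhile_append_stop _ _ _ '(' hpar (by simp)
    rw [hstop]
  · have hr_all : (PySem.Chars.rstrip m).takeWhile (· ≠ '(') = PySem.Chars.rstrip m :=
      List.takeWhile_eq_self_iff.mpr (fun c hc => by
        simp only [decide_eq_true_eq]
        intro heq; subst heq; exact hpar hc)
    have hsplit2 : m.takeWhile (· ≠ '(')
        = PySem.Chars.rstrip m ++ ((m.reverse.takeWhile PySem.Chars.isspace).reverse).takeWhile (· ≠ '(') := by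
      conv_lhs => rw [hmrq]
      exact List.takeWhile_append_of_pos (fun c hc => by
        simp only [decide_eq_true_eq]
        intro heq; subst heq; exact hpar hc)
    rw [hsplit2, hr_all, List.flatMap_append]
    have hq'_ws : ∀ c ∈ ((m.reverse.takeWhile PySem.Chars.isspace).reverse).takeWhile (· ≠ '('),
        PySem.Chars.isspace c = true :=
      fun c hc => hq_ws c ((List.takeWhile_sublist _).mem hc)
    have hq'_dom : ∀ c ∈ ((m.reverse.takeWhile PySem.Chars.isspace).reverse).takeWhile (· ≠ '('),
        pvDomChar c = true :=
      fun c hc => hq_dom c ((List.takeWhile_sublist _).mem hc)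
    rw [pv_flatMap_pvF_ws _ (fun c hc => ⟨hq'_dom c hc, hq'_ws c hc⟩),
      pv_pvW_ws_suffix _ hq'_ws]

-- the common canonical value
def pvCanon (cs : List Char) : List String :=
  ((pvW ((cs.takeWhile (· ≠ '(')).flatMap pvF) []).map
      (fun t => String.ofList (PySem.Chars.upper t))).filter
    (fun tok => !(pvSuffixTokens.contains tok))

lemma pv_strip_nil_all_ws (l : List Char) (h : PySem.Chars.strip l = []) :
    ∀ c ∈ l, PySem.Chars.isspace c = true := by
  rw [PySem.Chars.strip, PySem.Chars.rstrip] at h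
  have h1 : (PySem.Chars.lstrip l).reverse.dropWhile PySem.Chars.isspace = [] :=
    List.reverse_eq_nil_iff.mp h
  have h2 := List.dropWhile_eq_nil_iff.mp h1
  have h3 : ∀ c ∈ PySem.Chars.lstrip l, PySem.Chars.isspace c = true :=
    fun c hc => h2 c (List.mem_reverse.mpr hc)
  intro c hc
  rw [← List.takeWhile_append_dropWhile (p := PySem.Chars.isspace) (l := l)] at hc
  rcases List.mem_append.mp hc with hc | hc
  · exact List.mem_takeWhile_imp hc
  · exact h3 c hc

lemma pv_intercalate_nil (ws : List (List Char)) (hw : ∀ w ∈ ws, w ≠ [])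
    (h : List.intercalate [' '] ws = []) : ws = [] := by
  cases ws with
  | nil => rfl
  | cons w t =>
    cases t with
    | nil =>
      rw [show List.intercalate [' '] [w] = w by simp [List.intercalate, List.intersperse]] at h
      exact absurd h (hw w List.mem_cons_self)
    | cons v t' =>
      rw [show List.intercalate [' '] (w :: v :: t') = w ++ ' ' :: List.intercalate [' '] (v :: t')
        by simp [List.intercalate, List.intersperse]] at h
      rcases List.append_eq_nil_iff.mp h with ⟨_, h2⟩
      cases h2

lemma pv_portB_eq_canon (value : String) (h : ∀ c ∈ value.toList, pvDomChar c = true) :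
    name_tokens_py_alt value = pvCanon value.toList := by
  unfold name_tokens_py_alt pvCanon
  have hsub : ∀ c ∈ value.toList.takeWhile (· ≠ '('), pvDomChar c = true :=
    fun c hc => h c ((List.takeWhile_sublist _).mem hc)
  simp only [pv_bGo_eq _ hsub]
  simp

lemma pv_portA_eq_canon (value : String) (h : ∀ c ∈ value.toList, pvDomChar c = true) :
    name_tokens_py value = pvCanon value.toList := by
  unfold name_tokens_py
  by_cases h0 : PySem.Str.strip value = ""
  · rw [if_pos h0]
    have h0l : PySem.Chars.strip value.toList = [] := by
      have h' := congrArg String.toList h0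
      simpa using h'
    have hallws := pv_strip_nil_all_ws value.toList h0l
    have htk_ws : ∀ c ∈ value.toList.takeWhile (· ≠ '('), PySem.Chars.isspace c = true :=
      fun c hc => hallws c ((List.takeWhile_sublist _).mem hc)
    have htk_dom : ∀ c ∈ value.toList.takeWhile (· ≠ '('), pvDomChar c = true :=
      fun c hc => h c ((List.takeWhile_sublist _).mem hc)
    unfold pvCanon
    rw [pv_flatMap_pvF_ws _ (fun c hc => ⟨htk_dom c hc, htk_ws c hc⟩),
      pv_pvW_allspace _ htk_ws []]
    rfl
  · rw [if_neg h0]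
    have ht0_dom : ∀ c ∈ (PySem.Str.strip value).toList, pvDomChar c = true := by
      intro c hc
      rw [PySem.Str.toList_strip, PySem.Chars.strip, PySem.Chars.rstrip] at hc
      have hc1 : c ∈ (PySem.Chars.lstrip value.toList).reverse :=
        (List.dropWhile_sublist _).mem (List.mem_reverse.mp hc)
      have hc2 : c ∈ PySem.Chars.lstrip value.toList := List.mem_reverse.mp hc1
      rw [PySem.Chars.lstrip] at hc2
      exact h c ((List.dropWhile_sublist _).mem hc2)
    -- text after the paren cut, as a char list
    have htext1 : (if PySem.Str.isIn "(" (PySem.Str.strip value) then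
          ((PySem.Str.splitMax? (PySem.Str.strip value) "(" 1).getD []).headD ""
        else PySem.Str.strip value).toList
        = (PySem.Str.strip value).toList.takeWhile (· ≠ '(') := by
      by_cases hpar : PySem.Str.isIn "(" (PySem.Str.strip value)
      · rw [if_pos hpar]
        obtain ⟨tail, htail⟩ := pv_splitOnMax_head (PySem.Str.strip value).toList
        rw [PySem.Str.splitMax?, PySem.Chars.splitMax?]
        rw [show ("(" : String).toList = ['('] from rfl]
        simp only [List.isEmpty_cons, Bool.false_eq_true, if_false, Option.map_some,
          Option.getD_some, htail, List.map_cons, List.headD_cons, String.toList_ofList]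
      · rw [if_neg hpar]
        have hnotin : '(' ∉ (PySem.Str.strip value).toList := by
          intro hmem
          exact hpar ((PySem.Str.isIn_iff_infix "(" _).mpr
            ((List.singleton_infix_iff '(' _).mpr hmem))
        exact (List.takeWhile_eq_self_iff.mpr (fun c hc => by
          simp only [decide_eq_true_eq]
          intro heq; subst heq; exact hnotin hc)).symm
    -- the replace pipeline, as a char list
    have htext3 : (PySem.Str.replace (PySem.Str.replace (PySem.Str.replace
          (PySem.Str.replace (if PySem.Str.isIn "(" (PySem.Str.strip value) then
            ((PySem.Str.splitMax? (PySem.Str.strip value) "(" 1).getD []).headD ""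
          else PySem.Str.strip value) "-" " ") "." "") "'" "") "," " ").toList
        = ((PySem.Str.strip value).toList.takeWhile (· ≠ '(')).flatMap pvF := by
      rw [PySem.Str.toList_replace, PySem.Str.toList_replace, PySem.Str.toList_replace,
        PySem.Str.toList_replace, htext1]
      exact pv_pipeline_eq_flatMap _
    have hwords := pv_pvW_words
      (((PySem.Str.strip value).toList.takeWhile (· ≠ '(')).flatMap pvF) []
      (fun x hx => by simp at hx)
    have htext4 : (PySem.Str.join " " (PySem.Str.split₀ (PySem.Str.replace (PySem.Str.replace
          (PySem.Str.replace (PySem.Str.replace (if PySem.Str.isIn "(" (PySem.Str.strip value) then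
            ((PySem.Str.splitMax? (PySem.Str.strip value) "(" 1).getD []).headD ""
          else PySem.Str.strip value) "-" " ") "." "") "'" "") "," " "))).toList
        = List.intercalate [' ']
            (pvW (((PySem.Str.strip value).toList.takeWhile (· ≠ '(')).flatMap pvF) []) := by
      rw [PySem.Str.toList_join, PySem.Str.split₀_map_toList, htext3, pv_split₀_eq_pvW]
      rfl
    have hcanon : pvCanon value.toList
        = ((pvW (((PySem.Str.strip value).toList.takeWhile (· ≠ '(')).flatMap pvF) []).map
            (fun t => String.ofList (PySem.Chars.upper t))).filter
          (fun tok => !(pvSuffixTokens.contains tok)) := by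
      unfold pvCanon
      rw [← pv_strip_tokens value.toList h, ← PySem.Str.toList_strip]
    by_cases hws : pvW (((PySem.Str.strip value).toList.takeWhile (· ≠ '(')).flatMap pvF) [] = []
    · have h4 : PySem.Str.join " " (PySem.Str.split₀ (PySem.Str.replace (PySem.Str.replace
          (PySem.Str.replace (PySem.Str.replace (if PySem.Str.isIn "(" (PySem.Str.strip value) then
            ((PySem.Str.splitMax? (PySem.Str.strip value) "(" 1).getD []).headD ""
          else PySem.Str.strip value) "-" " ") "." "") "'" "") "," " ")) = "" :=
        String.toList_eq_nil_iff.mp (by rw [htext4, hws]; rfl)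
      rw [if_pos h4, hcanon, hws]
      rfl
    · have h4 : ¬(PySem.Str.join " " (PySem.Str.split₀ (PySem.Str.replace (PySem.Str.replace
          (PySem.Str.replace (PySem.Str.replace (if PySem.Str.isIn "(" (PySem.Str.strip value) then
            ((PySem.Str.splitMax? (PySem.Str.strip value) "(" 1).getD []).headD ""
          else PySem.Str.strip value) "-" " ") "." "") "'" "") "," " ")) = "") := by
        intro he
        apply hws
        apply pv_intercalate_nil _ (fun w hw => (hwords w hw).1)
        rw [← htext4]
        exact String.toList_eq_nil_iff.mpr he
      rw [if_neg h4]
      have hsplitU : PySem.Chars.split₀ ((PySem.Str.upper (PySem.Str.join " "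
            (PySem.Str.split₀ (PySem.Str.replace (PySem.Str.replace (PySem.Str.replace
            (PySem.Str.replace (if PySem.Str.isIn "(" (PySem.Str.strip value) then
              ((PySem.Str.splitMax? (PySem.Str.strip value) "(" 1).getD []).headD ""
            else PySem.Str.strip value) "-" " ") "." "") "'" "") "," " ")))).toList)
          = List.map (List.map PySem.Chars.upperChar)
              (pvW (((PySem.Str.strip value).toList.takeWhile (· ≠ '(')).flatMap pvF) []) := by
        rw [PySem.Str.toList_upper, htext4, PySem.Chars.upper, pv_split₀_eq_pvW]
        have hup := pv_pvW_upper (List.intercalate [' ']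
          (pvW (((PySem.Str.strip value).toList.takeWhile (· ≠ '(')).flatMap pvF) [])) []
        rw [List.map_nil] at hup
        rw [hup, pv_join_split _ hwords]
      rw [PySem.Str.split₀, hsplitU, hcanon, List.map_map]
      apply List.filter_congr
      intro tok htok
      obtain ⟨w, hw, rfl⟩ := List.mem_map.mp htok
      have hwne : w ≠ [] := (hwords w hw).1
      simp only [Function.comp_apply, bne, Bool.not_false, Bool.true_and]
      simp [PySem.Chars.upper]
      exact fun _ => hwne
  

-- ===== VERDICT (by name: the statement is the Claim_ definition above) =====
theorem name_tokens_py_spec : Claim_equal_name_tokens_py := by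
  intro value hdom
  have h : ∀ c ∈ value.toList, pvDomChar c = true := by
    have := hdom
    unfold Dom_name_tokens_py pvDomStr at this
    simpa [List.all_eq_true] using this
  unfold Spec_name_tokens_py
  rw [pv_portA_eq_canon value h, pv_portB_eq_canon value h]
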